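-- pv_equiv track=rewrite | github.com/xdc7/pythonworkout | chapter-03/04-extra-03-most-popular-shells-with-username.py | most_popular_shell
-- ===== SOURCE A (Python) =====
-- def most_popular_shell(passwdFile):
--     shells = {}
--     for line in passwdFile.split('\n'):
--         if not line:
--             continue
--         shell = line.split(':')[-1]
--         user = line.split(':')[0]
--         if shells.get(shell):
--             shells[shell]['count'] += 1
--             shells[shell]['users'].append(user)
--         else:
--             shells[shell] = {'count' : 1, 'users' : [user]}
--
--     # Easier way to understand how the sorting works
--     # items =  sorted(tuple(shells.items()), key=lambda item: item[1].get('count'), reverse=True)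
--     # result = {}
--     # for item in items:
--     #     result[item[0]] = sorted(item[1].get("users"))
--
--     # One-liner or a more 'pythonic way'
--     result = {item[0]: f' {sorted(item[1].get("users"))}' for item in sorted(tuple(shells.items()), key=lambda item: item[1].get('count'), reverse=True)}
--
--     return result
-- ===== SOURCE B (Python) =====
-- def most_popular_shell(passwdFile):
--     # No grouping dict at all: collect (user, shell) pairs, take the distinct shells in
--     # first-appearance order, sort them by a negated per-shell count (stable ascending ==
--     # A's reverse=True on counts), and build each group by a per-shell scan of the pairs.
--     pairs = [(l.split(':')[0], l.split(':')[-1]) for l in passwdFile.split('\n') if l]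
--     shells = list(dict.fromkeys(s for _, s in pairs))
--     order = sorted(shells, key=lambda sh: -sum(1 for _, s in pairs if s == sh))
--     return {sh: f' {sorted(u for u, s in pairs if s == sh)}' for sh in order}
-- ===== Notes on version B (the rewrite author's own statement) =====
-- stated objective: alternative
-- what changed: B removes A's grouping dict of two-field count/member records entirely: it builds (user, shell) pairs, dedups the shells in first-appearance order with dict.fromkeys, sorts them by a negated per-shell count (stable ascending, the same tie order as A's reverse=True), and materialises each group's members by a per-shell scan of the pairs; counts and user lists are recomputed by scanning, never stored.
import Mathlib
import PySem

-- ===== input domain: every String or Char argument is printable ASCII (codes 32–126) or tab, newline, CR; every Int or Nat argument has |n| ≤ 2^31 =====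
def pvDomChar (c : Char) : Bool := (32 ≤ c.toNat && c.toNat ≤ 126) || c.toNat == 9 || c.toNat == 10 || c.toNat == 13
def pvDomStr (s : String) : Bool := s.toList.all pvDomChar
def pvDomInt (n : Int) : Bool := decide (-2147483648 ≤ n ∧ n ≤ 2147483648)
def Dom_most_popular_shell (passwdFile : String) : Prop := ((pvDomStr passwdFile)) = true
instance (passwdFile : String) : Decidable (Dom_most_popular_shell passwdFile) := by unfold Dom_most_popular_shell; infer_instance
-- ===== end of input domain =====

-- B drops A's grouping dict of two-field count/member records entirely: it dedups the shells in
-- first-appearance order, sorts them by a NEGATED per-shell count (stable ascending, matching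
-- A's reverse=True tie order), and builds each group by a per-shell scan of the (user, shell)
-- pairs (objective: alternative; B is O(n·s) where A is O(n)).

-- Shared library-level helper: Python's  f' {sorted(users)}'  (repr of a sorted list of strings),
-- which appears verbatim in both A and B.  Exact for repr() on the printable-ASCII + tab/CR domain
-- (no '\n' can occur inside a piece of split('\n')).
def pvReprChar (q : Char) (c : Char) : List Char :=
  if c = '\\' then ['\\', '\\']
  else if c = q then ['\\', q]
  else if c = '\t' then ['\\', 't']
  else if c = '\n' then ['\\', 'n']
  else if c = '\r' then ['\\', 'r']
  else [c]

def pvReprStr (s : String) : List Char :=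
  let cs := s.toList
  let q : Char := if cs.contains '\'' && !(cs.contains '"') then '"' else '\''
  q :: (cs.flatMap (pvReprChar q) ++ [q])

def pvFmtUsers (users : List String) : String :=
  String.ofList (' ' :: '[' ::
    (PySem.Chars.join [',', ' '] ((PySem.List.sorted users (fun x => x) false).map pvReprStr) ++ [']']))

-- ===== PORT A =====
-- split('\n') / split(':') have a non-empty separator, so PySem.Str.split? is always `some`
-- and the splits are never empty, so the [0] / [-1] indexings never raise (default "" is dead).
def most_popular_shell (passwdFile : String) : List (String × String) :=
  let lines := (PySem.Str.split? passwdFile "\n").getD []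
  let shells : PySem.Dict String (Int × List String) :=
    lines.foldl (fun shells line =>
      if line = "" then shells
      else
        let shell := PySem.List.pyGetD ((PySem.Str.split? line ":").getD []) (-1) ""
        let user  := PySem.List.pyGetD ((PySem.Str.split? line ":").getD []) 0 ""
        match shells.get? shell with
        | some cu => shells.insert shell (cu.1 + 1, cu.2 ++ [user])
        | none    => shells.insert shell (1, [user])) PySem.Dict.empty
  let sortedItems := PySem.List.sorted shells.items (fun item => item.2.1) true
  -- the result dict comprehension, built key by key
  (sortedItems.foldl (fun r item => r.insert item.1 (pvFmtUsers item.2.2)) PySem.Dict.empty).items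

-- ===== PORT B =====
def most_popular_shell_alt (passwdFile : String) : List (String × String) :=
  let pairs :=
    ((((PySem.Str.split? passwdFile "\n").getD []).filter (fun l => l != "")).map
      (fun l => (PySem.List.pyGetD ((PySem.Str.split? l ":").getD []) 0 "",
                 PySem.List.pyGetD ((PySem.Str.split? l ":").getD []) (-1) "")))
  -- list(dict.fromkeys(...)) = ordered dedup
  let shells := PySem.List.dedup (pairs.map (fun p => p.2))
  -- sum(1 for _, s in pairs if s == sh) is countP
  let order := PySem.List.sorted shells
      (fun sh => -((pairs.countP (fun p => p.2 == sh) : Int))) false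
  -- the result dict comprehension: its keys are distinct, so it is a map
  order.map (fun sh =>
    (sh, pvFmtUsers ((pairs.filter (fun p => p.2 == sh)).map (fun p => p.1))))

-- ===== PRECONDITION & SPEC =====
def Spec_most_popular_shell (passwdFile : String) (out : List (String × String)) : Prop := out = most_popular_shell_alt passwdFile
instance (passwdFile : String) (out : List (String × String)) : Decidable (Spec_most_popular_shell passwdFile out) := by unfold Spec_most_popular_shell; infer_instance

-- ===== CLAIM (what is proved, stated in full; the proofs are below) =====
def Claim_equal_most_popular_shell : Prop := ∀ (passwdFile : String), Dom_most_popular_shell passwdFile → Spec_most_popular_shell passwdFile (most_popular_shell passwdFile)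

-- ===== LEMMAS AND PROOFS =====

def pvShellOf (line : String) : String :=
  PySem.List.pyGetD ((PySem.Str.split? line ":").getD []) (-1) ""

def pvUserOf (line : String) : String :=
  PySem.List.pyGetD ((PySem.Str.split? line ":").getD []) 0 ""

def pvPairOf (line : String) : String × String := (pvUserOf line, pvShellOf line)

-- A's guarded loop body, and A's unguarded loop body (proof-side names)
def pvStepA (d : PySem.Dict String (Int × List String)) (line : String) :
    PySem.Dict String (Int × List String) :=
  if line = "" then d
  else
    match d.get? (pvShellOf line) with
    | some cu => d.insert (pvShellOf line) (cu.1 + 1, cu.2 ++ [pvUserOf line])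
    | none    => d.insert (pvShellOf line) (1, [pvUserOf line])

def pvStepA' (d : PySem.Dict String (Int × List String)) (line : String) :
    PySem.Dict String (Int × List String) :=
  match d.get? (pvShellOf line) with
  | some cu => d.insert (pvShellOf line) (cu.1 + 1, cu.2 ++ [pvUserOf line])
  | none    => d.insert (pvShellOf line) (1, [pvUserOf line])

-- per-shell count and members, read off the filtered lines
def pvCnt (flt : List String) (sh : String) : Int :=
  (flt.countP (fun l => pvShellOf l == sh) : Int)

def pvUsers (flt : List String) (sh : String) : List String :=
  (flt.filter (fun l => pvShellOf l == sh)).map pvUserOf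

-- A's loop body is a Dict.modify
theorem pvStepA'_eq_modify :
    pvStepA' = fun d line =>
      d.modify (pvShellOf line) ((0 : Int), ([] : List String))
        (fun cu => (cu.1 + 1, cu.2 ++ [pvUserOf line])) := by
  funext d line
  unfold pvStepA' PySem.Dict.modify
  cases h : d.get? (pvShellOf line) with
  | none => rw [PySem.Dict.getD_of_get?_eq_none _ _ h]; simp
  | some cu => rw [PySem.Dict.getD_of_get?_eq_some _ _ h]

-- A's grouping fold, looked up at any shell
theorem pvFoldA_getD (flt : List String) (d : PySem.Dict String (Int × List String)) (sh : String) :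
    (flt.foldl pvStepA' d).getD sh ((0 : Int), ([] : List String))
      = ((d.getD sh ((0 : Int), ([] : List String))).1 + pvCnt flt sh,
         (d.getD sh ((0 : Int), ([] : List String))).2 ++ pvUsers flt sh) := by
  induction flt generalizing d with
  | nil => simp [pvCnt, pvUsers]
  | cons hd tl ih =>
    simp only [List.foldl_cons]
    rw [ih, pvStepA'_eq_modify]
    simp only [PySem.Dict.getD_modify]
    by_cases h : sh = pvShellOf hd
    · rw [if_pos h]
      subst h
      simp only [pvCnt, pvUsers, List.countP_cons, List.filter_cons, beq_self_eq_true,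
        if_true, List.map_cons, Prod.mk.injEq]
      refine ⟨by push_cast; ring, by simp⟩
    · have hb : (pvShellOf hd == sh) = false := by simp [Ne.symm h]
      rw [if_neg h]
      simp [pvCnt, pvUsers, hb]

-- generic: insertBy commutes with map
theorem pvInsertBy_map {α β : Type} (f : α → β) (p : β → β → Bool) (x : α) (l : List α) :
    PySem.List.insertBy p (f x) (l.map f)
      = (PySem.List.insertBy (fun a b => p (f a) (f b)) x l).map f := by
  induction l with
  | nil => rfl
  | cons hd tl ih =>
    simp only [List.map_cons, PySem.List.insertBy]
    by_cases h : p (f x) (f hd) = true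
    · rw [if_pos h, if_pos h]; rfl
    · rw [if_neg h, if_neg h, List.map_cons, ih]

-- generic: reverse-sorting a mapped list = mapping the reverse-sorted list
theorem pvSorted_map {α β : Type} (f : α → β) (key : β → Int) (l : List α) :
    PySem.List.sorted (l.map f) key true
      = (PySem.List.sorted l (fun a => key (f a)) true).map f := by
  rw [PySem.List.sorted_rev_eq_foldl_insertBy, PySem.List.sorted_rev_eq_foldl_insertBy]
  suffices h : ∀ (acc : List α),
      (l.map f).foldl (fun acc x => PySem.List.insertBy (fun a b => decide (key b < key a)) x acc) (acc.map f)
        = (l.foldl (fun acc x => PySem.List.insertBy (fun a b => decide (key (f b) < key (f a))) x acc) acc).map f by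
    simpa using h []
  induction l with
  | nil => intro acc; rfl
  | cons hd tl ih =>
    intro acc
    simp only [List.map_cons, List.foldl_cons]
    rw [pvInsertBy_map f (fun a b => decide (key b < key a)) hd acc]
    exact ih _

-- reverse=True with key k = stable ascending sort with key -k
theorem pvSorted_rev_eq_neg {α : Type} (l : List α) (key : α → Int) :
    PySem.List.sorted l key true = PySem.List.sorted l (fun a => -(key a)) false := by
  rw [PySem.List.sorted_rev_eq_foldl_insertBy, PySem.List.sorted_eq_foldl_insertBy]
  have hp : (fun a b : α => decide (key b < key a)) = (fun a b : α => decide (-(key a) < -(key b))) := by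
    funext a b; simp
  rw [hp]

-- ===== VERDICT (by name: the statement is the Claim_ definition above) =====
theorem most_popular_shell_spec : Claim_equal_most_popular_shell := by
  intro passwdFile _
  show most_popular_shell passwdFile = most_popular_shell_alt passwdFile
  unfold most_popular_shell most_popular_shell_alt
  rw [show (fun l => (PySem.List.pyGetD ((PySem.Str.split? l ":").getD []) 0 "",
                      PySem.List.pyGetD ((PySem.Str.split? l ":").getD []) (-1) "")) = pvPairOf from rfl]
  set lines := (PySem.Str.split? passwdFile "\n").getD [] with hlines
  set flt := lines.filter (fun l => l != "") with hflt
  set S := PySem.Set.ofList (flt.map pvShellOf) with hS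
  -- the canonical middle form both sides reach
  set mid := (PySem.List.sorted S (fun sh => pvCnt flt sh) true).map
      (fun sh => (sh, pvFmtUsers (pvUsers flt sh))) with hmid
  -- ---- A side ----
  have hA : lines.foldl pvStepA PySem.Dict.empty = flt.foldl pvStepA' PySem.Dict.empty := by
    rw [hflt, ← PySem.List.foldl_if_eq_foldl_filter (fun l => l != "") pvStepA' lines PySem.Dict.empty]
    refine PySem.List.foldl_congr_mem' lines _ _ _ (fun x _ acc => ?_)
    by_cases h : x = "" <;> simp [pvStepA, pvStepA', h]
  set dA := flt.foldl pvStepA' PySem.Dict.empty with hdA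
  have hkeys : dA.keys = S := by
    rw [hdA, pvStepA'_eq_modify,
        PySem.Dict.keys_foldl_modify_key flt pvShellOf ((0 : Int), ([] : List String))
          (fun d line => fun cu => (cu.1 + 1, cu.2 ++ [pvUserOf line])) PySem.Dict.empty]
    simp only [PySem.Dict.keys_empty]
    rw [hS]
    exact PySem.Set.update_empty _
  have hnodS : S.Nodup := by rw [hS]; exact PySem.Set.nodup_ofList _
  have hnodk : dA.keys.Nodup := by rw [hkeys]; exact hnodS
  have hitems : dA.items = S.map (fun sh => (sh, (pvCnt flt sh, pvUsers flt sh))) := by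
    rw [PySem.Dict.items_eq_map_keys dA hnodk ((0 : Int), ([] : List String)), hkeys]
    refine List.map_congr_left (fun sh _ => ?_)
    rw [hdA, pvFoldA_getD]
    simp [PySem.Dict.getD_empty]
  have hperm : (PySem.List.sorted S (fun sh => pvCnt flt sh) true).Perm S :=
    PySem.List.sorted_perm _ _ _
  have hnodupSorted : (PySem.List.sorted S (fun sh => pvCnt flt sh) true).Nodup :=
    hperm.nodup_iff.mpr hnodS
  have hAside : ((PySem.List.sorted ((lines.foldl pvStepA PySem.Dict.empty).items)
        (fun item => item.2.1) true).foldl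
        (fun r item => r.insert item.1 (pvFmtUsers item.2.2)) PySem.Dict.empty).items = mid := by
    rw [hA, hitems,
        pvSorted_map (fun sh => (sh, (pvCnt flt sh, pvUsers flt sh))) (fun item => item.2.1) S]
    rw [show (fun a : String => ((a, (pvCnt flt a, pvUsers flt a)) :
          String × (Int × List String)).2.1) = (fun sh => pvCnt flt sh) from rfl]
    have hfresh := PySem.Dict.items_foldl_insert_fresh
        ((PySem.List.sorted S (fun sh => pvCnt flt sh) true).map
          (fun sh => (sh, (pvCnt flt sh, pvUsers flt sh))))
        Prod.fst (fun item => pvFmtUsers item.2.2) PySem.Dict.empty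
        (fun a _ => by simp [pysem])
        (by
          have h1 : ((PySem.List.sorted S (fun sh => pvCnt flt sh) true).map
              (fun sh => (sh, (pvCnt flt sh, pvUsers flt sh)))).map Prod.fst
              = PySem.List.sorted S (fun sh => pvCnt flt sh) true := by
            rw [List.map_map]
            exact List.map_id _
          rw [h1]; exact hnodupSorted)
    simp only [List.foldl_map] at hfresh ⊢
    rw [hfresh, hmid]
    simp [List.map_map]
    rfl
  show ((PySem.List.sorted ((lines.foldl pvStepA PySem.Dict.empty).items) (fun item => item.2.1) true).foldl
          (fun r item => r.insert item.1 (pvFmtUsers item.2.2)) PySem.Dict.empty).items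
      = (PySem.List.sorted (PySem.List.dedup ((flt.map pvPairOf).map (fun p => p.2)))
          (fun sh => -(((flt.map pvPairOf).countP (fun p => p.2 == sh) : Int))) false).map
          (fun sh => (sh, pvFmtUsers (((flt.map pvPairOf).filter (fun p => p.2 == sh)).map (fun p => p.1))))
  rw [hAside]
  -- ---- B side ----
  have hpairs2 : ((flt.map pvPairOf).map (fun p => p.2)) = flt.map pvShellOf := by
    rw [List.map_map]; rfl
  have hkey : (fun sh => -(((flt.map pvPairOf).countP (fun p => p.2 == sh) : Int)))
      = (fun sh => -(pvCnt flt sh)) := by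
    funext sh; rw [List.countP_map]; rfl
  rw [PySem.List.dedup, hpairs2, ← hS, hkey, ← pvSorted_rev_eq_neg S (fun sh => pvCnt flt sh), hmid]
  refine List.map_congr_left (fun sh _ => ?_)
  have husers : ((flt.map pvPairOf).filter (fun p => p.2 == sh)).map (fun p => p.1)
      = pvUsers flt sh := by
    rw [List.filter_map, List.map_map]; rfl
  rw [husers]
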